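-- pv_equiv track=rewrite | github.com/DanielHaitink/downloadSubs | downloadSubs.py | setLimit
-- ===== SOURCE A (Python) =====
-- def byteStep(n):
-- 	return 1024 * (n)
--
-- def get_num(x):
--     return int(''.join(ele for ele in x if ele.isdigit()))
--
-- def parseLimit(string):
-- 	string = string.lower()
-- 	number = get_num(string)
-- 	if "tb" in string:
-- 		return parseLimit(str(byteStep(number)) + 'gb')
-- 	elif "gb" in string:
-- 		return parseLimit(str(byteStep(number)) + 'mb')
-- 	elif "mb" in string:
-- 		return parseLimit(str(byteStep(number)) + 'kb')
-- 	elif "kb" in string: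
-- 		return parseLimit(str(byteStep(number)) + 'b')
-- 	return number
--
-- def setLimit(string):
-- 	isLow = None
-- 	lowLimit = -1
-- 	highLimit = -1
-- 	lowString = ""
-- 	highString = ""
-- 	for letter in string:
-- 		if letter == '-':
-- 			isLow = True
-- 			continue;
-- 		elif letter == '+':
-- 			isLow = False
-- 			continue
-- 		elif isLow == True:
-- 			lowString += letter
-- 		elif isLow == False:
-- 			highString += letter
-- 	if lowString != "":
-- 		lowLimit = parseLimit(lowString)
-- 	if highString != "":
-- 		highLimit = parseLimit(highString)
-- 	return lowLimit, highLimit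
-- ===== SOURCE B (Python) =====
-- def _parse(seg):
--     if not seg:
--         return -1
--     seg = seg.lower()
--     number = int(''.join(c for c in seg if c.isdigit()))
--     for unit, power in (('tb', 4), ('gb', 3), ('mb', 2), ('kb', 1)):
--         if unit in seg:
--             return number * 1024 ** power
--     return number
--
-- def setLimit(string):
--     runs = []
--     marker, seg = None, ''
--     for c in string:
--         if c in '+-':
--             if marker is not None:
--                 runs.append((marker, seg))
--             marker, seg = c, ''
--         elif marker is not None:
--             seg += c
--     if marker is not None:
--         runs.append((marker, seg))
--     low = ''.join(t for m, t in runs if m == '-')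
--     high = ''.join(t for m, t in runs if m == '+')
--     return _parse(low), _parse(high)
-- ===== Notes on version B (the rewrite author's own statement) =====
-- stated objective: simpler
-- what changed: A's recursive unit-peeling parseLimit (which re-renders the number with the next-smaller unit up to four times and re-parses it) is replaced by a single closed-form multiplier lookup (first matching unit among tb/gb/mb/kb picks a power of 1024), and A's two-accumulator character state machine is replaced by a (marker, run)-list splitter whose minus- and plus-runs are concatenated afterwards.
import Mathlib
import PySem

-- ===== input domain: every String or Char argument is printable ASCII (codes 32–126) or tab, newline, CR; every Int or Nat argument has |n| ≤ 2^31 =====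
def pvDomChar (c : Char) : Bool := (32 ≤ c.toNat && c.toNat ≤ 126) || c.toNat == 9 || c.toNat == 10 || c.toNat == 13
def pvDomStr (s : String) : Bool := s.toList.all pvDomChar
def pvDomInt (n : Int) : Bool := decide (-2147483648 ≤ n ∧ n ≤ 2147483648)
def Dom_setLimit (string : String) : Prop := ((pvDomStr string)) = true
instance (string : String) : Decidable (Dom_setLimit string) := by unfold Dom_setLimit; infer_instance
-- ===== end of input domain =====

-- B replaces A's depth-bounded recursive unit-peeling parseLimit by a direct closed-form
-- multiplier lookup, and A's two-accumulator sign-splitting loop by a (marker, run)-list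
-- splitter; objective: simpler (same asymptotic cost).

-- ===== PORT A =====
-- int(s) is called (in both programs) only on the joined isdigit-filtered characters, i.e. on a
-- string of decimal digits only; pyIntOfDigits? is a hand port of int() exact exactly there:
-- none on the empty string (ValueError), otherwise the decimal value.  (PySem.Int.ofChars? is not used
-- because its core parser is a private definition the proofs could not unfold.)
def pyIntOfDigits? (ds : List Char) : Option Int :=
  if ds = [] then none else some (ds.foldl (fun a c => 10 * a + ((c.toNat : Int) - 48)) 0)

def byteStep (n : Int) : Int := 1024 * n

def get_num (x : List Char) : Option Int :=
  pyIntOfDigits? (x.filter PySem.Chars.isdigit)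

-- parseLimit; the Nat argument is fuel only (the Python recursion has depth ≤ 4 < 5 = the fuel
-- setLimit passes, so the 0 case is never reached from setLimit).
def parseLimitF : Nat → List Char → Option Int
  | 0, _ => none
  | f + 1, s0 =>
    let s := PySem.Chars.lower s0
    match get_num s with
    | none => none    -- int of an empty string raises ValueError; excluded by Pre_setLimit
    | some number =>
      if PySem.Chars.isIn ['t','b'] s then
        parseLimitF f (PySem.Int.toChars (byteStep number) ++ ['g','b'])
      else if PySem.Chars.isIn ['g','b'] s then
        parseLimitF f (PySem.Int.toChars (byteStep number) ++ ['m','b'])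
      else if PySem.Chars.isIn ['m','b'] s then
        parseLimitF f (PySem.Int.toChars (byteStep number) ++ ['k','b'])
      else if PySem.Chars.isIn ['k','b'] s then
        parseLimitF f (PySem.Int.toChars (byteStep number) ++ ['b'])
      else some number

-- the body of A's for-loop: state (isLow, lowString, highString)
def stepA (st : Option Bool × List Char × List Char) (letter : Char) :
    Option Bool × List Char × List Char :=
  if letter = '-' then (some true, st.2.1, st.2.2)
  else if letter = '+' then (some false, st.2.1, st.2.2)
  else if st.1 = some true then (st.1, st.2.1 ++ [letter], st.2.2)
  else if st.1 = some false then (st.1, st.2.1, st.2.2 ++ [letter])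
  else st

def setLimit (string : String) : Int × Int :=
  let st := string.toList.foldl stepA (none, [], [])
  let lowLimit : Int := if st.2.1 ≠ [] then (parseLimitF 5 st.2.1).getD (-1) else -1
  let highLimit : Int := if st.2.2 ≠ [] then (parseLimitF 5 st.2.2).getD (-1) else -1
  (lowLimit, highLimit)

-- ===== PORT B =====
-- the body of B's for-loop: state (runs, marker, seg)
def stepB (st : List (Char × List Char) × Option Char × List Char) (c : Char) :
    List (Char × List Char) × Option Char × List Char :=
  if c = '+' ∨ c = '-' then
    (st.1 ++ (match st.2.1 with | none => [] | some mk => [(mk, st.2.2)]), some c, [])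
  else
    match st.2.1 with
    | none => st
    | some _ => (st.1, st.2.1, st.2.2 ++ [c])

-- B's run-closing step: if marker is not None: runs.append((marker, seg))
def pvClose (runs : List (Char × List Char)) (m : Option Char) (seg : List Char) :
    List (Char × List Char) :=
  runs ++ (match m with | none => [] | some mk => [(mk, seg)])

-- B's join of the runs of one marker; join with empty separator is concatenation, hence flatten
def pvJoin (mk : Char) (runs : List (Char × List Char)) : List Char :=
  ((runs.filter (fun r => r.1 = mk)).map (·.2)).flatten

def parseSeg (seg : List Char) : Int :=
  if seg = [] then -1
  else
    let s := PySem.Chars.lower seg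
    match pyIntOfDigits? (s.filter PySem.Chars.isdigit) with
    | none => -1    -- int of an empty string raises ValueError; excluded by Pre_setLimit
    | some number =>
      match [((['t','b'] : List Char), (4 : Nat)), (['g','b'], 3), (['m','b'], 2),
             (['k','b'], 1)].find? (fun u => PySem.Chars.isIn u.1 s) with
      | some u => number * 1024 ^ u.2
      | none => number

def setLimit_alt (string : String) : Int × Int :=
  let st := string.toList.foldl stepB ([], none, [])
  let runs := pvClose st.1 st.2.1 st.2.2
  (parseSeg (pvJoin '-' runs), parseSeg (pvJoin '+' runs))

-- ===== PRECONDITION & SPEC =====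
-- the '-' and '+' segments of the input: each non-marker character goes to the side of the most
-- recent preceding '-'/'+' marker (characters before any marker are dropped) — used only by Pre_
def pvSplit : List Char → Option Bool → List Char × List Char
  | [], _ => ([], [])
  | c :: cs, m =>
    if c = '-' then pvSplit cs (some true)
    else if c = '+' then pvSplit cs (some false)
    else
      match m with
      | some true => (c :: (pvSplit cs m).1, (pvSplit cs m).2)
      | some false => ((pvSplit cs m).1, c :: (pvSplit cs m).2)
      | none => pvSplit cs m

-- Pre_ excludes exactly the inputs on which a nonempty minus- or plus-segment contains no digit:
-- there A raises ValueError (int of an empty string in get_num), and B raises the same way —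
-- neither returns a value on such inputs.
def Pre_setLimit (string : String) : Prop :=
  ((pvSplit string.toList none).1 ≠ [] →
    (pvSplit string.toList none).1.any PySem.Chars.isdigit = true) ∧
  ((pvSplit string.toList none).2 ≠ [] →
    (pvSplit string.toList none).2.any PySem.Chars.isdigit = true)

instance (string : String) : Decidable (Pre_setLimit string) := by
  unfold Pre_setLimit; infer_instance

def pvWitness_setLimit : String := "-1mb+2gb"

def Spec_setLimit (string : String) (out : Int × Int) : Prop := out = setLimit_alt string
instance (string : String) (out : Int × Int) : Decidable (Spec_setLimit string out) := by
  unfold Spec_setLimit; infer_instance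

-- ===== CLAIM (what is proved, stated in full; the proofs are below) =====
def Claim_equal_setLimit : Prop :=
  ∀ (string : String), Dom_setLimit string → Pre_setLimit string →
    Spec_setLimit string (setLimit string)

-- ===== LEMMAS AND PROOFS =====

-- ---- character classes ----

theorem digit_toNat (c : Char) (h : PySem.Chars.isdigit c = true) :
    48 ≤ c.toNat ∧ c.toNat ≤ 57 := by
  simp [PySem.Chars.isdigit, Char.le_def] at h
  exact ⟨UInt32.le_iff_toNat_le.mp h.1, UInt32.le_iff_toNat_le.mp h.2⟩

theorem lowerChar_of_digit (c : Char) (h : PySem.Chars.isdigit c = true) :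
    PySem.Chars.lowerChar c = c := by
  have h' := digit_toNat c h
  simp [PySem.Chars.lowerChar, PySem.Chars.isupper]
  intro h1 _
  exfalso
  rw [Char.le_def] at h1
  have := UInt32.le_iff_toNat_le.mp h1
  simp at this
  omega

theorem isdigit_eq_toNat (c : Char) :
    PySem.Chars.isdigit c = (decide (48 ≤ c.toNat) && decide (c.toNat ≤ 57)) := by
  rfl

theorem isdigit_lowerChar (c : Char) :
    PySem.Chars.isdigit (PySem.Chars.lowerChar c) = PySem.Chars.isdigit c := by
  by_cases h : PySem.Chars.isupper c = true
  · simp only [PySem.Chars.lowerChar, h, if_pos]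
    simp only [PySem.Chars.isupper, Bool.and_eq_true, decide_eq_true_eq, Char.le_def] at h
    have h65 := UInt32.le_iff_toNat_le.mp h.1
    have h90 := UInt32.le_iff_toNat_le.mp h.2
    simp at h65 h90
    have hv : Nat.isValidChar (c.toNat + 32) := by left; omega
    have ht : (Char.ofNat (c.toNat + 32)).toNat = c.toNat + 32 := by
      rw [Char.toNat_ofNat, if_pos hv]
    rw [isdigit_eq_toNat, isdigit_eq_toNat, ht]
    rw [Bool.eq_iff_iff]
    simp only [Bool.and_eq_true, decide_eq_true_eq]
    omega
  · simp [PySem.Chars.lowerChar, h]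

theorem filter_lower (l : List Char) :
    (PySem.Chars.lower l).filter PySem.Chars.isdigit = l.filter PySem.Chars.isdigit := by
  simp only [PySem.Chars.lower, List.filter_map]
  have : (PySem.Chars.isdigit ∘ PySem.Chars.lowerChar) = PySem.Chars.isdigit := by
    funext c; simp [isdigit_lowerChar c]
  rw [this]
  conv_rhs => rw [show l.filter PySem.Chars.isdigit =
    (l.filter PySem.Chars.isdigit).map id from (List.map_id _).symm]
  apply List.map_congr_left
  intro c hc
  exact lowerChar_of_digit c (List.of_mem_filter hc)

-- ---- decimal digits: str(n) round-trips through the digit-value fold ----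

def pvVal (a : Int) (ds : List Char) : Int :=
  ds.foldl (fun a c => 10 * a + ((c.toNat : Int) - 48)) a

theorem toDigitsCore_acc (f n : Nat) (tail : List Char) :
    Nat.toDigitsCore 10 f n tail = Nat.toDigitsCore 10 f n [] ++ tail := by
  induction f generalizing n tail with
  | zero => simp [Nat.toDigitsCore]
  | succ f ih =>
    simp only [Nat.toDigitsCore]
    split
    · simp
    · rw [ih (n/10) ((n % 10).digitChar :: tail), ih (n/10) [(n % 10).digitChar]]
      simp

theorem digitChar_isdigit (k : Nat) (hk : k < 10) :
    PySem.Chars.isdigit (Nat.digitChar k) = true := by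
  interval_cases k <;> decide

theorem digitChar_val (k : Nat) (hk : k < 10) :
    ((Nat.digitChar k).toNat : Int) - 48 = (k : Int) := by
  interval_cases k <;> decide

theorem toDigitsCore_digits (f n : Nat) :
    ∀ c ∈ Nat.toDigitsCore 10 f n [], PySem.Chars.isdigit c = true := by
  induction f generalizing n with
  | zero => simp [Nat.toDigitsCore]
  | succ f ih =>
    intro c hc
    simp only [Nat.toDigitsCore] at hc
    split at hc
    · simp at hc
      subst hc
      exact digitChar_isdigit _ (Nat.mod_lt _ (by norm_num))
    · rw [toDigitsCore_acc] at hc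
      rcases List.mem_append.mp hc with h | h
      · exact ih _ _ h
      · simp at h
        subst h
        exact digitChar_isdigit _ (Nat.mod_lt _ (by norm_num))

theorem pvVal_append (a : Int) (xs ys : List Char) :
    pvVal a (xs ++ ys) = pvVal (pvVal a xs) ys := by
  simp [pvVal]

theorem toDigitsCore_val (f : Nat) : ∀ n : Nat, n < 10 ^ f →
    pvVal 0 (Nat.toDigitsCore 10 f n []) = (n : Int) := by
  induction f with
  | zero => intro n hn; interval_cases n; simp [Nat.toDigitsCore, pvVal]
  | succ f ih =>
    intro n hn
    simp only [Nat.toDigitsCore]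
    split
    · rename_i h
      have : n % 10 = n := by omega
      simp [pvVal, this]
      rw [digitChar_val n (by omega)]
    · rename_i h
      rw [toDigitsCore_acc, pvVal_append, ih (n / 10) (by
        rw [Nat.div_lt_iff_lt_mul (by norm_num : 0 < 10)]
        calc n < 10 ^ (f+1) := hn
        _ = 10 ^ f * 10 := by ring)]
      simp only [pvVal, List.foldl_cons, List.foldl_nil]
      rw [digitChar_val (n % 10) (by omega)]
      push_cast
      omega

theorem toDigitsCore_ne_nil (f n : Nat) : Nat.toDigitsCore 10 (f + 1) n [] ≠ [] := by
  simp only [Nat.toDigitsCore]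
  split
  · simp
  · rw [toDigitsCore_acc]; simp

theorem toChars_eq (m : Int) (hm : 0 ≤ m) :
    PySem.Int.toChars m = Nat.toDigitsCore 10 (m.toNat + 1) m.toNat [] := by
  simp [PySem.Int.toChars, Nat.toDigits]
  intro h
  omega

theorem toChars_digits (m : Int) (hm : 0 ≤ m) :
    ∀ c ∈ PySem.Int.toChars m, PySem.Chars.isdigit c = true := by
  rw [toChars_eq m hm]
  exact toDigitsCore_digits _ _

theorem roundtrip (m : Int) (hm : 0 ≤ m) :
    pyIntOfDigits? (PySem.Int.toChars m) = some m := by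
  rw [toChars_eq m hm]
  rw [pyIntOfDigits?, if_neg (toDigitsCore_ne_nil _ _)]
  have := toDigitsCore_val (m.toNat + 1) m.toNat (by
    calc m.toNat < 10 ^ m.toNat := Nat.lt_pow_self (by norm_num)
    _ ≤ 10 ^ (m.toNat + 1) := Nat.pow_le_pow_right (by norm_num) (by omega))
  rw [pvVal] at this
  rw [this]
  congr 1
  omega

theorem pvVal_nonneg (ds : List Char) (hds : ∀ c ∈ ds, PySem.Chars.isdigit c = true)
    (a : Int) (ha : 0 ≤ a) : 0 ≤ pvVal a ds := by
  induction ds generalizing a with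
  | nil => simpa [pvVal]
  | cons c t ih =>
    simp only [pvVal, List.foldl_cons]
    refine ih (fun x hx => hds x (List.mem_cons_of_mem _ hx)) _ ?_
    have := digit_toNat c (hds c List.mem_cons_self)
    omega

-- ---- list facts used to evaluate A's recursion ----

theorem lower_digits_append (ds u : List Char)
    (hds : ∀ c ∈ ds, PySem.Chars.isdigit c = true)
    (hu : ∀ c ∈ u, PySem.Chars.lowerChar c = c) :
    PySem.Chars.lower (ds ++ u) = ds ++ u := by
  simp only [PySem.Chars.lower, List.map_append]
  rw [List.map_congr_left (fun c hc => lowerChar_of_digit c (hds c hc)),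
      List.map_congr_left hu]
  simp

theorem filter_digits_append (ds u : List Char)
    (hds : ∀ c ∈ ds, PySem.Chars.isdigit c = true)
    (hu : ∀ c ∈ u, PySem.Chars.isdigit c = false) :
    (ds ++ u).filter PySem.Chars.isdigit = ds := by
  rw [List.filter_append, List.filter_eq_self.mpr hds]
  have : u.filter PySem.Chars.isdigit = [] := by
    rw [List.filter_eq_nil_iff]
    intro c hc
    simp [hu c hc]
  simp [this]

theorem isIn_suffix (u s : List Char) : PySem.Chars.isIn u (s ++ u) = true := by
  rw [PySem.Chars.isIn_iff_infix]
  exact (List.suffix_append s u).isInfix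

theorem isIn_false_of_missing (u s : List Char) (c : Char) (hc : c ∈ u) (hs : c ∉ s) :
    PySem.Chars.isIn u s = false := by
  rw [PySem.Chars.isIn_eq_false_iff]
  intro h
  exact hs (h.subset hc)

theorem not_mem_digits (ds : List Char) (hds : ∀ c ∈ ds, PySem.Chars.isdigit c = true)
    (c : Char) (hc : PySem.Chars.isdigit c = false) : c ∉ ds := by
  intro h
  rw [hds c h] at hc
  simp at hc

theorem isIn_false_unit (u ds v : List Char) (c : Char) (hcu : c ∈ u)
    (hds : ∀ x ∈ ds, PySem.Chars.isdigit x = true)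
    (hcd : PySem.Chars.isdigit c = false) (hcv : c ∉ v) :
    PySem.Chars.isIn u (ds ++ v) = false := by
  refine isIn_false_of_missing u _ c hcu ?_
  intro h
  rcases List.mem_append.mp h with h | h
  · exact not_mem_digits ds hds c hcd h
  · exact hcv h

-- ---- A's recursion, unit by unit ----

set_option maxRecDepth 8192 in
theorem parse_b (f : Nat) (m : Int) (hm : 0 ≤ m) :
    parseLimitF (f + 1) (PySem.Int.toChars m ++ ['b']) = some m := by
  have hds := toChars_digits m hm
  rw [parseLimitF.eq_2]
  simp only [get_num,
    lower_digits_append (PySem.Int.toChars m) ['b'] hds (by intro c hc; fin_cases hc <;> decide),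
    filter_digits_append (PySem.Int.toChars m) ['b'] hds (by intro c hc; fin_cases hc <;> decide),
    roundtrip m hm,
    isIn_false_unit ['t','b'] (PySem.Int.toChars m) ['b'] 't' (by decide) hds (by decide) (by decide),
    isIn_false_unit ['g','b'] (PySem.Int.toChars m) ['b'] 'g' (by decide) hds (by decide) (by decide),
    isIn_false_unit ['m','b'] (PySem.Int.toChars m) ['b'] 'm' (by decide) hds (by decide) (by decide),
    isIn_false_unit ['k','b'] (PySem.Int.toChars m) ['b'] 'k' (by decide) hds (by decide) (by decide)]
  simp

set_option maxRecDepth 8192 in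
theorem parse_kb (f : Nat) (m : Int) (hm : 0 ≤ m) :
    parseLimitF (f + 2) (PySem.Int.toChars m ++ ['k','b']) = some (1024 * m) := by
  have hds := toChars_digits m hm
  have h2 : (0:Int) ≤ 1024 * m := by positivity
  rw [show f + 2 = (f + 1) + 1 from rfl, parseLimitF.eq_2]
  simp only [get_num,
    lower_digits_append (PySem.Int.toChars m) ['k','b'] hds (by intro c hc; fin_cases hc <;> decide),
    filter_digits_append (PySem.Int.toChars m) ['k','b'] hds (by intro c hc; fin_cases hc <;> decide),
    roundtrip m hm,
    isIn_false_unit ['t','b'] (PySem.Int.toChars m) ['k','b'] 't' (by decide) hds (by decide) (by decide),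
    isIn_false_unit ['g','b'] (PySem.Int.toChars m) ['k','b'] 'g' (by decide) hds (by decide) (by decide),
    isIn_false_unit ['m','b'] (PySem.Int.toChars m) ['k','b'] 'm' (by decide) hds (by decide) (by decide),
    isIn_suffix ['k','b'] (PySem.Int.toChars m)]
  simp only [byteStep]
  simp [parse_b f (1024 * m) h2]

set_option maxRecDepth 8192 in
theorem parse_mb (f : Nat) (m : Int) (hm : 0 ≤ m) :
    parseLimitF (f + 3) (PySem.Int.toChars m ++ ['m','b']) = some (1024 ^ 2 * m) := by
  have hds := toChars_digits m hm
  have h2 : (0:Int) ≤ 1024 * m := by positivity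
  rw [show f + 3 = (f + 2) + 1 from rfl, parseLimitF.eq_2]
  simp only [get_num,
    lower_digits_append (PySem.Int.toChars m) ['m','b'] hds (by intro c hc; fin_cases hc <;> decide),
    filter_digits_append (PySem.Int.toChars m) ['m','b'] hds (by intro c hc; fin_cases hc <;> decide),
    roundtrip m hm,
    isIn_false_unit ['t','b'] (PySem.Int.toChars m) ['m','b'] 't' (by decide) hds (by decide) (by decide),
    isIn_false_unit ['g','b'] (PySem.Int.toChars m) ['m','b'] 'g' (by decide) hds (by decide) (by decide),
    isIn_suffix ['m','b'] (PySem.Int.toChars m)]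
  simp only [byteStep]
  simp [parse_kb f (1024 * m) h2]
  ring

set_option maxRecDepth 8192 in
theorem parse_gb (f : Nat) (m : Int) (hm : 0 ≤ m) :
    parseLimitF (f + 4) (PySem.Int.toChars m ++ ['g','b']) = some (1024 ^ 3 * m) := by
  have hds := toChars_digits m hm
  have h2 : (0:Int) ≤ 1024 * m := by positivity
  rw [show f + 4 = (f + 3) + 1 from rfl, parseLimitF.eq_2]
  simp only [get_num,
    lower_digits_append (PySem.Int.toChars m) ['g','b'] hds (by intro c hc; fin_cases hc <;> decide),
    filter_digits_append (PySem.Int.toChars m) ['g','b'] hds (by intro c hc; fin_cases hc <;> decide),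
    roundtrip m hm,
    isIn_false_unit ['t','b'] (PySem.Int.toChars m) ['g','b'] 't' (by decide) hds (by decide) (by decide),
    isIn_suffix ['g','b'] (PySem.Int.toChars m)]
  simp only [byteStep]
  simp [parse_mb f (1024 * m) h2]
  ring

-- ---- per-segment agreement ----

theorem seg_agree (l : List Char) (hne : l ≠ [])
    (hd : l.any PySem.Chars.isdigit = true) :
    (parseLimitF 5 l).getD (-1) = parseSeg l := by
  have hdne : l.filter PySem.Chars.isdigit ≠ [] := by
    rcases List.any_eq_true.mp hd with ⟨c, hc, hdig⟩
    intro hnil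
    have : c ∈ l.filter PySem.Chars.isdigit := List.mem_filter.mpr ⟨hc, hdig⟩
    simp [hnil] at this
  have hds : ∀ c ∈ l.filter PySem.Chars.isdigit, PySem.Chars.isdigit c = true := by
    intro c hc; exact List.of_mem_filter hc
  have hnum : pyIntOfDigits? (l.filter PySem.Chars.isdigit)
      = some (pvVal 0 (l.filter PySem.Chars.isdigit)) := by
    rw [pyIntOfDigits?, if_neg hdne]; rfl
  set n := pvVal 0 (l.filter PySem.Chars.isdigit) with hn
  have hn0 : 0 ≤ n := pvVal_nonneg _ hds 0 le_rfl
  have hb : (0:Int) ≤ 1024 * n := by positivity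
  rw [show (5:Nat) = 4 + 1 from rfl, parseLimitF.eq_2, parseSeg, if_neg hne]
  simp only [get_num, filter_lower, hnum]
  by_cases htb : PySem.Chars.isIn ['t','b'] (PySem.Chars.lower l) = true
  · simp only [htb, if_pos, List.find?, byteStep]
    rw [show (4:Nat) = 0 + 4 from rfl, parse_gb 0 (1024 * n) hb]
    simp; ring
  · rw [Bool.not_eq_true] at htb
    by_cases hgb : PySem.Chars.isIn ['g','b'] (PySem.Chars.lower l) = true
    · simp only [htb, hgb, List.find?, byteStep, Bool.false_eq_true, if_false, if_pos]
      rw [show (4:Nat) = 1 + 3 from rfl, parse_mb 1 (1024 * n) hb]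
      simp; ring
    · rw [Bool.not_eq_true] at hgb
      by_cases hmb : PySem.Chars.isIn ['m','b'] (PySem.Chars.lower l) = true
      · simp only [htb, hgb, hmb, List.find?, byteStep, Bool.false_eq_true, if_false, if_pos]
        rw [show (4:Nat) = 2 + 2 from rfl, parse_kb 2 (1024 * n) hb]
        simp; ring
      · rw [Bool.not_eq_true] at hmb
        by_cases hkb : PySem.Chars.isIn ['k','b'] (PySem.Chars.lower l) = true
        · simp only [htb, hgb, hmb, hkb, List.find?, byteStep, Bool.false_eq_true, if_false,
            if_pos]
          rw [show (4:Nat) = 3 + 1 from rfl, parse_b 3 (1024 * n) hb]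
          simp; ring
        · rw [Bool.not_eq_true] at hkb
          simp only [htb, hgb, hmb, hkb, List.find?, Bool.false_eq_true, if_false]
          simp

-- ---- the two loops both compute pvSplit ----

theorem foldl_stepA (cs : List Char) (m : Option Bool) (l h : List Char) :
    (cs.foldl stepA (m, l, h)).2.1 = l ++ (pvSplit cs m).1 ∧
    (cs.foldl stepA (m, l, h)).2.2 = h ++ (pvSplit cs m).2 := by
  induction cs generalizing m l h with
  | nil => simp [pvSplit]
  | cons c cs ih =>
    simp only [List.foldl_cons, pvSplit]
    by_cases hc1 : c = '-'
    · simp [stepA, hc1, ih]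
    · by_cases hc2 : c = '+'
      · simp [stepA, hc2, ih]
      · rcases m with _ | b
        · simpa [stepA, hc1, hc2] using ih none l h
        · cases b
          · simpa [stepA, hc1, hc2] using ih (some false) l (h ++ [c])
          · simpa [stepA, hc1, hc2] using ih (some true) (l ++ [c]) h

def pvTr : Option Char → Option Bool
  | none => none
  | some c => if c = '-' then some true else if c = '+' then some false else none

theorem stepB_marker (st : List (Char × List Char) × Option Char × List Char) (c : Char)
    (hc : c = '+' ∨ c = '-') :
    stepB st c = (pvClose st.1 st.2.1 st.2.2, some c, []) := by
  simp [stepB, pvClose, if_pos hc]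

theorem stepB_none (st : List (Char × List Char) × Option Char × List Char) (c : Char)
    (hc : ¬(c = '+' ∨ c = '-')) (hst : st.2.1 = none) : stepB st c = st := by
  obtain ⟨runs, m, seg⟩ := st
  simp only at hst
  simp [stepB, if_neg hc, hst]

theorem stepB_some (runs : List (Char × List Char)) (mk : Char) (seg : List Char) (c : Char)
    (hc : ¬(c = '+' ∨ c = '-')) :
    stepB (runs, some mk, seg) c = (runs, some mk, seg ++ [c]) := by
  simp [stepB, if_neg hc]

theorem foldl_stepB (cs : List Char) (runs : List (Char × List Char)) (m : Option Char)
    (seg : List Char) (hm : m = none ∨ m = some '-' ∨ m = some '+') :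
    pvJoin '-' (pvClose (cs.foldl stepB (runs, m, seg)).1
        (cs.foldl stepB (runs, m, seg)).2.1 (cs.foldl stepB (runs, m, seg)).2.2) =
      pvJoin '-' (pvClose runs m seg) ++ (pvSplit cs (pvTr m)).1 ∧
    pvJoin '+' (pvClose (cs.foldl stepB (runs, m, seg)).1
        (cs.foldl stepB (runs, m, seg)).2.1 (cs.foldl stepB (runs, m, seg)).2.2) =
      pvJoin '+' (pvClose runs m seg) ++ (pvSplit cs (pvTr m)).2 := by
  induction cs generalizing runs m seg with
  | nil => simp [pvSplit]
  | cons c cs ih =>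
    simp only [List.foldl_cons]
    by_cases hc1 : c = '-'
    · subst hc1
      rw [stepB_marker _ _ (Or.inr rfl)]
      have h1 := ih (pvClose runs m seg) (some '-') [] (by simp)
      refine ⟨h1.1.trans ?_, h1.2.trans ?_⟩ <;>
        simp [pvSplit, pvTr, pvClose, pvJoin]
    · by_cases hc2 : c = '+'
      · subst hc2
        rw [stepB_marker _ _ (Or.inl rfl)]
        have h1 := ih (pvClose runs m seg) (some '+') [] (by simp)
        refine ⟨h1.1.trans ?_, h1.2.trans ?_⟩ <;>
          simp [pvSplit, pvTr, pvClose, pvJoin]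
      · have hc : ¬(c = '+' ∨ c = '-') := by tauto
        rcases hm with hm | hm | hm <;> subst hm
        · rw [stepB_none _ _ hc rfl]
          have h1 := ih runs none seg (Or.inl rfl)
          refine ⟨h1.1.trans ?_, h1.2.trans ?_⟩ <;>
            simp [pvSplit, pvTr, hc1, hc2]
        · rw [stepB_some _ _ _ _ hc]
          have h1 := ih runs (some '-') (seg ++ [c]) (by simp)
          refine ⟨h1.1.trans ?_, h1.2.trans ?_⟩ <;>
            simp [pvSplit, pvTr, pvClose, pvJoin, hc1, hc2]
        · rw [stepB_some _ _ _ _ hc]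
          have h1 := ih runs (some '+') (seg ++ [c]) (by simp)
          refine ⟨h1.1.trans ?_, h1.2.trans ?_⟩ <;>
            simp [pvSplit, pvTr, pvClose, pvJoin, hc1, hc2]

-- ===== VERDICT (by name: the statement is the Claim_ definition above) =====
theorem setLimit_spec : Claim_equal_setLimit := by
  unfold Claim_equal_setLimit
  intro s _ hpre
  simp only [Spec_setLimit, setLimit, setLimit_alt]
  obtain ⟨hA1, hA2⟩ := foldl_stepA s.toList none [] []
  obtain ⟨hB1, hB2⟩ := foldl_stepB s.toList [] none [] (Or.inl rfl)
  simp only [List.nil_append] at hA1 hA2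
  simp only [show pvJoin '-' (pvClose [] none []) = [] from rfl,
    show pvJoin '+' (pvClose [] none []) = [] from rfl,
    show pvTr none = none from rfl, List.nil_append] at hB1 hB2
  rw [hA1, hA2, hB1, hB2]
  obtain ⟨hp1, hp2⟩ := hpre
  rw [Prod.mk.injEq]
  constructor
  · by_cases hl : (pvSplit s.toList none).1 = []
    · simp [hl, parseSeg]
    · rw [if_pos hl]
      exact seg_agree _ hl (hp1 hl)
  · by_cases hh : (pvSplit s.toList none).2 = []
    · simp [hh, parseSeg]
    · rw [if_pos hh]
      exact seg_agree _ hh (hp2 hh)
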